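-- pv_equiv track=rewrite | github.com/quang9d7/Do-An-AI-2-logic--hcmus-19-ctntn | Project02_logic/PS4/SRC/main.py | converSentence
-- ===== SOURCE A (Python) =====
-- def converLiteral(literal):
--     if len(literal)==2:
--         return literal[1]
--     else:
--         return "-"+literal
--
-- def converLink(link):
--     if link=='OR':
--         return 'AND'
--     else:
--         return 'OR'
--
-- def converSentence(sen):
--     literals=sen.split(' ')
--     l=len(literals)
--     for i in range(0,l):
--         if i%2==0:
--             literals[i]=converLiteral(literals[i])
--         else:
--             literals[i]=converLink(literals[i])
--     return (' ').join(literals)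
-- ===== SOURCE B (Python) =====
-- def converSentence(sen):
--     toks = sen.split(' ')
--     out = []
--     while len(toks) >= 2:
--         head, link, toks = toks[0], toks[1], toks[2:]
--         out.append(head[1] if len(head) == 2 else '-' + head)
--         out.append('AND' if link == 'OR' else 'OR')
--     if toks:
--         t = toks[0]
--         out.append(t[1] if len(t) == 2 else '-' + t)
--     return ' '.join(out)
-- ===== Notes on version B (the rewrite author's own statement) =====
-- stated objective: alternative
-- what changed: Replaces the index loop with parity test over a mutable list by a loop that consumes two tokens (literal, link) per step into an output accumulator, with the negation/flip rules inlined, so no indices or i%2 arithmetic remain.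
import Mathlib
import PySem

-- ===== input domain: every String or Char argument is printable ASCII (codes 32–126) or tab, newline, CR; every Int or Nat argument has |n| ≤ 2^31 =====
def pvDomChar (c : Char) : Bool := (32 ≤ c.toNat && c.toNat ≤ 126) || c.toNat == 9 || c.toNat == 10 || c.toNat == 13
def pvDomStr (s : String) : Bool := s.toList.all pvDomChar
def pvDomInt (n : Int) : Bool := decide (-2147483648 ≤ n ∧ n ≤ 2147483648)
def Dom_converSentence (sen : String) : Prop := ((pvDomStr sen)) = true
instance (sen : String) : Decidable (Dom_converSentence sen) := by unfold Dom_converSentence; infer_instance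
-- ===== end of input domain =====

-- B replaces A's index loop with i%2 parity test by a loop that consumes two tokens (literal, link) per step into an accumulator, with the rewrite rules inlined (alternative decomposition, same cost).


-- ===== PORT A =====
def converLiteral (literal : String) : String :=
  if PySem.Str.len literal == 2 then
    ((PySem.Str.pyGet? literal 1).map (fun c => String.ofList [c])).getD ""  -- literal[1]; in range since len == 2
  else
    "-" ++ literal

def converLink (link : String) : String :=
  if link == "OR" then "AND" else "OR"

def converSentence (sen : String) : String :=
  let literals := (PySem.Str.split? sen " ").getD []   -- sep ≠ "", so split? is always some
  -- for i in range(0,l): literals[i] = … rewrites every element by its index parity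
  let literals := (PySem.List.enumerate literals 0).map
    (fun p => if p.1 % 2 == 0 then converLiteral p.2 else converLink p.2)
  PySem.Str.join " " literals

-- ===== PORT B =====
def convertLoop (out : List String) : List String → List String
  | head :: link :: rest =>
      convertLoop (out
        ++ [if PySem.Str.len head == 2 then ((PySem.Str.pyGet? head 1).map (fun c => String.ofList [c])).getD "" else "-" ++ head]
        ++ [if link == "OR" then "AND" else "OR"]) rest
  | [t] => out ++ [if PySem.Str.len t == 2 then ((PySem.Str.pyGet? t 1).map (fun c => String.ofList [c])).getD "" else "-" ++ t]
  | [] => out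

def converSentence_alt (sen : String) : String :=
  PySem.Str.join " " (convertLoop [] ((PySem.Str.split? sen " ").getD []))

-- ===== PRECONDITION & SPEC =====
def Spec_converSentence (sen : String) (out : String) : Prop := out = converSentence_alt sen
instance (sen : String) (out : String) : Decidable (Spec_converSentence sen out) := by unfold Spec_converSentence; infer_instance

-- ===== CLAIM (what is proved, stated in full; the proofs are below) =====
def Claim_equal_converSentence : Prop := ∀ (sen : String), Dom_converSentence sen → Spec_converSentence sen (converSentence sen)

-- ===== LEMMAS AND PROOFS =====
theorem convertLoop_eq_map_enumerate (ts : List String) (out : List String) (n : Nat) :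
    convertLoop out ts
      = out ++ (PySem.List.enumerate ts (2 * (n : Int))).map
          (fun p => if p.1 % 2 == 0 then converLiteral p.2 else converLink p.2) := by
  induction out, ts using convertLoop.induct generalizing n with
  | case3 out => simp [convertLoop, PySem.List.enumerate_nil]
  | case2 out t =>
      have h1 : (2:Int) ∣ 2 * (n:Int) := ⟨n, rfl⟩
      simp [convertLoop, PySem.List.enumerate_cons, PySem.List.enumerate_nil, converLiteral, h1]
  | case1 out head link rest ih =>
      have h1 : (2:Int) ∣ 2 * (n:Int) := ⟨n, rfl⟩
      have h2 : ¬ (2:Int) ∣ (2 * (n:Int) + 1) := by omega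
      have e : (2:Int) * ↑n + 1 + 1 = 2 * (↑(n + 1 : Nat)) := by push_cast; ring
      rw [convertLoop, ih (n + 1), PySem.List.enumerate_cons, PySem.List.enumerate_cons, e]
      simp [converLiteral, converLink, h1, h2]

-- ===== VERDICT (by name: the statement is the Claim_ definition above) =====
theorem converSentence_spec : Claim_equal_converSentence := by
  intro sen _
  have h := convertLoop_eq_map_enumerate ((PySem.Str.split? sen " ").getD []) [] 0
  simp only [Nat.cast_zero, mul_zero, List.nil_append] at h
  simp only [Spec_converSentence, converSentence, converSentence_alt, h]
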